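-- pv_equiv track=rewrite | github.com/quantumagi/MetaFormer | data_processor/.ipynb_checkpoints/infer_data_types-checkpoint.py | find_common_types
-- ===== SOURCE A (Python) =====
-- def find_common_types(type_candidates_list):
--     """
--     Find common data types across all batches for each column.
--     """
--     common_types = {}
--     for type_candidates in type_candidates_list:
--         for col, candidates in type_candidates.items():
--             if col not in common_types:
--                 common_types[col] = candidates
--             else:
--                 common_types[col] = common_types[col].intersection(candidates)
--     return common_types
-- ===== SOURCE B (Python) =====
-- def find_common_types(type_candidates_list):
--     # Two passes: collect each column's candidate sets in first-encounter order,
--     # then intersect each column's list with a manual reduce.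
--     groups = {}
--     for type_candidates in type_candidates_list:
--         for col, candidates in type_candidates.items():
--             groups.setdefault(col, []).append(candidates)
--     result = {}
--     for col, sets in groups.items():
--         acc = sets[0]
--         for s in sets[1:]:
--             acc = acc.intersection(s)
--         result[col] = acc
--     return result
-- ===== Notes on version B (the rewrite author's own statement) =====
-- stated objective: alternative
-- what changed: A fuses lookup-and-intersect into one dict-update loop; B splits it into two passes: first group each column's candidate sets across batches into lists (first-encounter order), then produce the result by reducing each list with intersection.
import Mathlib
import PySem

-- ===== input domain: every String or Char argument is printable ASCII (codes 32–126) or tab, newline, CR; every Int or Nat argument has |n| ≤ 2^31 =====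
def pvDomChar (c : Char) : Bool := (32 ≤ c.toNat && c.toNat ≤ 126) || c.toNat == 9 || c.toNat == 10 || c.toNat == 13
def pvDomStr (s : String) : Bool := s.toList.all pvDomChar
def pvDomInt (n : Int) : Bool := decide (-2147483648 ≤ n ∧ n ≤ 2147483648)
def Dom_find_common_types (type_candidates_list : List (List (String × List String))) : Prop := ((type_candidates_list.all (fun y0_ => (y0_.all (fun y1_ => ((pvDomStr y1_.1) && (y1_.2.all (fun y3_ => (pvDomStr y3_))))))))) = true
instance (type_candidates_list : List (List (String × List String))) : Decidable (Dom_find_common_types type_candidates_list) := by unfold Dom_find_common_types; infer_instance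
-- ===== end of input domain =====

-- B replaces A's fused lookup-and-intersect dict update by a collect pass (group each column's
-- candidate sets across batches) followed by a reduce pass (intersect each group): same cost, different decomposition.

-- ===== PORT A =====
-- body of A's inner loop: seed the column, or intersect the stored set with the new candidates
def fct_stepA (common_types : PySem.Dict String (List String)) (p : String × List String) : PySem.Dict String (List String) :=
  if common_types.contains p.1 then
    common_types.insert p.1 (PySem.Set.inter (common_types.getD p.1 PySem.Set.empty) p.2)
  else
    common_types.insert p.1 p.2

def find_common_types (type_candidates_list : List (List (String × List String))) : List (String × List String) :=
  (type_candidates_list.foldl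
    (fun common_types type_candidates => type_candidates.foldl fct_stepA common_types)
    PySem.Dict.empty).items

-- ===== PORT B =====
-- groups.setdefault(col, []).append(candidates)  =  groups[col] = groups.get(col, []) + [candidates]
def fct_group_step (groups : PySem.Dict String (List (List String))) (p : String × List String) : PySem.Dict String (List (List String)) :=
  groups.modify p.1 [] (fun ls => ls ++ [p.2])

-- acc = sets[0]; for s in sets[1:]: acc = acc.intersection(s)   (grouped lists are never empty)
def fct_reduce_inter (sets : List (List String)) : List String :=
  match sets with
  | [] => []
  | acc :: rest => rest.foldl PySem.Set.inter acc

def find_common_types_alt (type_candidates_list : List (List (String × List String))) : List (String × List String) :=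
  let groups := type_candidates_list.foldl
    (fun groups type_candidates => type_candidates.foldl fct_group_step groups)
    PySem.Dict.empty
  (groups.items.foldl (fun result p => result.insert p.1 (fct_reduce_inter p.2)) PySem.Dict.empty).items

-- ===== PRECONDITION & SPEC =====
def Spec_find_common_types (type_candidates_list : List (List (String × List String))) (out : List (String × List String)) : Prop := out = find_common_types_alt type_candidates_list
instance (type_candidates_list : List (List (String × List String))) (out : List (String × List String)) : Decidable (Spec_find_common_types type_candidates_list out) := by unfold Spec_find_common_types; infer_instance

-- ===== CLAIM (what is proved, stated in full; the proofs are below) =====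
def Claim_equal_find_common_types : Prop := ∀ (type_candidates_list : List (List (String × List String))), Dom_find_common_types type_candidates_list → Spec_find_common_types type_candidates_list (find_common_types type_candidates_list)

-- ===== LEMMAS AND PROOFS =====

-- proof-only: turn one grouped entry into the corresponding A-side entry
def fctMr (p : String × List (List String)) : String × List String := (p.1, fct_reduce_inter p.2)

lemma fct_red_append (ls : List (List String)) (v : List String) (h : ls ≠ []) :
    fct_reduce_inter (ls ++ [v]) = PySem.Set.inter (fct_reduce_inter ls) v := by
  cases ls with
  | nil => exact absurd rfl h
  | cons a t => simp [fct_reduce_inter, List.foldl_append]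

lemma fct_get?_map_mr (l : List (String × List (List String))) (c : String) :
    PySem.Dict.get? ⟨l.map fctMr⟩ c
      = (PySem.Dict.get? (⟨l⟩ : PySem.Dict String (List (List String))) c).map fct_reduce_inter := by
  induction l with
  | nil => rfl
  | cons q t ih =>
      obtain ⟨k, v⟩ := q
      simp only [List.map_cons, fctMr, PySem.Dict.get?_mk_cons]
      by_cases h : (k == c) = true
      · simp [h]
      · simp [h, ih]

lemma fct_contains_map_mr (l : List (String × List (List String))) (c : String) :
    PySem.Dict.contains ⟨l.map fctMr⟩ c
      = PySem.Dict.contains (⟨l⟩ : PySem.Dict String (List (List String))) c := by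
  simp [PySem.Dict.contains, List.any_map, fctMr, Function.comp_def]

lemma fct_step (p : String × List String) (l : List (String × List (List String)))
    (hv : ∀ q ∈ l, q.2 ≠ []) :
    fct_stepA ⟨l.map fctMr⟩ p = ⟨(fct_group_step ⟨l⟩ p).items.map fctMr⟩ := by
  by_cases hc : PySem.Dict.contains (⟨l⟩ : PySem.Dict String (List (List String))) p.1 = true
  · obtain ⟨w, hw⟩ : ∃ w, PySem.Dict.get? (⟨l⟩ : PySem.Dict String (List (List String))) p.1 = some w := by
      have h := PySem.Dict.contains_eq_isSome_get? (⟨l⟩ : PySem.Dict String (List (List String))) p.1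
      rw [hc] at h
      exact Option.isSome_iff_exists.mp h.symm
    have hwne : w ≠ [] := hv (p.1, w) (PySem.Dict.mem_items_of_get?_eq_some _ hw)
    have hgA : PySem.Dict.getD (⟨l.map fctMr⟩ : PySem.Dict String (List String)) p.1 PySem.Set.empty
        = fct_reduce_inter w := by
      refine PySem.Dict.getD_of_get?_eq_some _ _ ?_
      rw [fct_get?_map_mr, hw]; rfl
    have hgG : PySem.Dict.getD (⟨l⟩ : PySem.Dict String (List (List String))) p.1 [] = w :=
      PySem.Dict.getD_of_get?_eq_some _ _ hw
    have hcA : PySem.Dict.contains (⟨l.map fctMr⟩ : PySem.Dict String (List String)) p.1 = true := by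
      rw [fct_contains_map_mr]; exact hc
    simp only [fct_stepA, fct_group_step, PySem.Dict.modify, hgA, hgG, hcA, hc, if_true,
      PySem.Dict.insert, PySem.Dict.items, PySem.Dict.mk.injEq, List.map_map]
    apply List.map_congr_left
    intro q hq
    by_cases h : q.1 = p.1
    · simp [fctMr, h, fct_red_append w p.2 hwne]
    · simp [fctMr, h]
  · rw [Bool.not_eq_true] at hc
    have hcA : PySem.Dict.contains (⟨l.map fctMr⟩ : PySem.Dict String (List String)) p.1 = false := by
      rw [fct_contains_map_mr]; exact hc
    have hgG : PySem.Dict.getD (⟨l⟩ : PySem.Dict String (List (List String))) p.1 [] = [] :=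
      PySem.Dict.getD_of_not_contains _ _ hc
    simp [fct_stepA, fct_group_step, PySem.Dict.modify, hcA, hc, hgG,
      PySem.Dict.insert, PySem.Dict.items, fctMr, fct_reduce_inter]

lemma fct_stepG_values (l : List (String × List (List String))) (p : String × List String)
    (hv : ∀ q ∈ l, q.2 ≠ []) :
    ∀ q ∈ (fct_group_step ⟨l⟩ p).items, q.2 ≠ [] := by
  intro q hq
  by_cases hc : PySem.Dict.contains (⟨l⟩ : PySem.Dict String (List (List String))) p.1 = true
  · simp only [fct_group_step, PySem.Dict.modify, PySem.Dict.insert, hc, if_true,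
      PySem.Dict.items, List.mem_map] at hq
    obtain ⟨r, hr, rfl⟩ := hq
    by_cases h : (r.1 == p.1) = true
    · simp [h]
    · simpa [h] using hv r hr
  · rw [Bool.not_eq_true] at hc
    simp only [fct_group_step, PySem.Dict.modify, PySem.Dict.insert] at hq
    rw [hc] at hq
    simp only [Bool.false_eq_true, if_false, List.mem_append, List.mem_singleton] at hq
    rcases hq with h | h
    · exact hv q h
    · rw [h]; simp

lemma fct_stepG_keys (l : List (String × List (List String))) (p : String × List String) :
    (fct_group_step ⟨l⟩ p).items.map Prod.fst =
      if l.any (fun q => q.1 == p.1) then l.map Prod.fst else l.map Prod.fst ++ [p.1] := by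
  by_cases hc : PySem.Dict.contains (⟨l⟩ : PySem.Dict String (List (List String))) p.1 = true
  · have hany : l.any (fun q => q.1 == p.1) = true := hc
    rw [if_pos hany]
    simp only [fct_group_step, PySem.Dict.modify, PySem.Dict.insert, hc, if_true,
      PySem.Dict.items, List.map_map]
    apply List.map_congr_left
    intro q hq
    by_cases h : q.1 = p.1
    · simp [h]
    · simp [h]
  · rw [Bool.not_eq_true] at hc
    have hany : l.any (fun q => q.1 == p.1) = false := hc
    rw [if_neg (by simp [hany])]
    simp only [fct_group_step, PySem.Dict.modify, PySem.Dict.insert]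
    rw [hc]
    simp

lemma fct_fold (ps : List (String × List String)) :
    ∀ (l : List (String × List (List String))), (∀ q ∈ l, q.2 ≠ []) →
      ps.foldl fct_stepA ⟨l.map fctMr⟩ = ⟨(ps.foldl fct_group_step ⟨l⟩).items.map fctMr⟩ := by
  induction ps with
  | nil => intro l hv; rfl
  | cons p ps ih =>
      intro l hv
      rw [List.foldl_cons, List.foldl_cons, fct_step p l hv]
      exact ih (fct_group_step ⟨l⟩ p).items (fct_stepG_values l p hv)

lemma fct_groups_keys_nodup (ps : List (String × List String)) :
    ∀ (l : List (String × List (List String))), (l.map Prod.fst).Nodup →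
      ((ps.foldl fct_group_step ⟨l⟩).items.map Prod.fst).Nodup := by
  induction ps with
  | nil => intro l h; exact h
  | cons p ps ih =>
      intro l h
      rw [List.foldl_cons]
      refine ih (fct_group_step ⟨l⟩ p).items ?_
      rw [fct_stepG_keys l p]
      split_ifs with hcnd
      · exact h
      · have hx : p.1 ∉ l.map Prod.fst := by
          intro hm
          obtain ⟨q, hq, hq1⟩ := List.mem_map.mp hm
          have : l.any (fun q => q.1 == p.1) = true :=
            List.any_eq_true.mpr ⟨q, hq, by simp [hq1]⟩
          exact hcnd this
        rw [List.nodup_append]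
        refine ⟨h, List.nodup_singleton _, ?_⟩
        intro a ha b hb
        rw [List.mem_singleton] at hb
        subst hb
        exact fun e => hx (e ▸ ha)

-- ===== VERDICT (by name: the statement is the Claim_ definition above) =====
theorem find_common_types_spec : Claim_equal_find_common_types := by
  intro tcl _
  unfold Spec_find_common_types
  show find_common_types tcl = find_common_types_alt tcl
  simp only [find_common_types, find_common_types_alt]
  rw [← List.foldl_flatten, ← List.foldl_flatten]
  have hkeys : ((tcl.flatten.foldl fct_group_step PySem.Dict.empty).items.map Prod.fst).Nodup :=
    fct_groups_keys_nodup tcl.flatten [] (by simp)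
  have hfresh : ∀ a ∈ (tcl.flatten.foldl fct_group_step PySem.Dict.empty).items,
      (PySem.Dict.empty : PySem.Dict String (List String)).contains a.1 = false := by
    intro a _
    simp [PySem.Dict.contains, PySem.Dict.empty]
  have hB : ((tcl.flatten.foldl fct_group_step PySem.Dict.empty).items.foldl
        (fun result p => result.insert p.1 (fct_reduce_inter p.2)) PySem.Dict.empty).items
      = (tcl.flatten.foldl fct_group_step PySem.Dict.empty).items.map fctMr := by
    have h := PySem.Dict.items_foldl_insert_fresh
      ((tcl.flatten.foldl fct_group_step PySem.Dict.empty).items) Prod.fst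
      (fun p : String × List (List String) => fct_reduce_inter p.2) PySem.Dict.empty hfresh hkeys
    simpa [fctMr, PySem.Dict.empty] using h
  rw [hB]
  have hA := fct_fold tcl.flatten [] (by simp)
  exact congrArg PySem.Dict.items hA
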